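-- pv_equiv track=rewrite | github.com/offbynull/learn | Bioinformatics/input/ch4_code/src/Utils.py | rna_to_dna
-- ===== SOURCE A (Python) =====
-- def rna_to_dna(rna: str):
--     ret = ''
--     for ch in rna:
--         if ch == 'A' or ch == 'C' or ch == 'G':
--             ret += ch
--         elif ch == 'U':
--             ret += 'T'
--         else:
--             raise
--     return ret
-- ===== SOURCE B (Python) =====
-- def rna_to_dna(rna: str):
--     if set(rna) - set('ACGU'):
--         raise
--     return rna.replace('U', 'T')
-- ===== Notes on version B (the rewrite author's own statement) =====
-- stated objective: simpler
-- what changed: Replaced the per-character branch-and-accumulate loop with a validate-then-transform decomposition: one set-difference alphabet check, then a single bulk rna.replace('U','T').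
import Mathlib
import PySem

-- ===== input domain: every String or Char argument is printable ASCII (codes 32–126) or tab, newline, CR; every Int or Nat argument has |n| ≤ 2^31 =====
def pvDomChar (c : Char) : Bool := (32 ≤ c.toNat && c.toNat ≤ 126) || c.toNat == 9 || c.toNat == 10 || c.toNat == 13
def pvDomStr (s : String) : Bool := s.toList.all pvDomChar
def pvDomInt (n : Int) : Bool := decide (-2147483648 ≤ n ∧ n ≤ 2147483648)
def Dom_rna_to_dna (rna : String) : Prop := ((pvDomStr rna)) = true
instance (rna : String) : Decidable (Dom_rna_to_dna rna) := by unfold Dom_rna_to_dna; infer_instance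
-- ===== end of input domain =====

-- B changes the shape: validate the whole string first, then one bulk replace('U','T');
-- objective: simpler. Equivalence of RETURN values is proved on Pre_ (A raises elsewhere).

-- ===== PORT A =====
-- the accumulate loop of A; on a character outside ACGU Python raises (bare raise),
-- so those inputs are outside Pre_ and the value returned there (the accumulator) is unclaimed
def rnaGoA (acc : String) (l : List Char) : String :=
  match l with
  | [] => acc
  | c :: cs =>
    if c = 'A' ∨ c = 'C' ∨ c = 'G' then rnaGoA (acc.push c) cs
    else if c = 'U' then rnaGoA (acc.push 'T') cs
    else acc

def rna_to_dna (rna : String) : String := rnaGoA "" rna.toList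

-- ===== PORT B =====
-- Source B: if set(rna) - set('ACGU'): raise   (raise ported as an unclaimed "" outside Pre_)
--       return rna.replace('U', 'T')
def rna_to_dna_alt (rna : String) : String :=
  if rna.toList.any (fun c => !(['A', 'C', 'G', 'U'].contains c)) then ""
  else PySem.Str.replace rna "U" "T"

-- ===== PRECONDITION & SPEC =====
-- exactly the inputs on which Python A returns (no bare raise): every character is in ACGU
def Pre_rna_to_dna (rna : String) : Prop :=
  (rna.toList.all fun c => c == 'A' || c == 'C' || c == 'G' || c == 'U') = true
instance (rna : String) : Decidable (Pre_rna_to_dna rna) := by unfold Pre_rna_to_dna; infer_instance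
def pvWitness_rna_to_dna : String := "AU"

def Spec_rna_to_dna (rna : String) (out : String) : Prop := out = rna_to_dna_alt rna
instance (rna : String) (out : String) : Decidable (Spec_rna_to_dna rna out) := by unfold Spec_rna_to_dna; infer_instance

-- ===== CLAIM (what is proved, stated in full; the proofs are below) =====
def Claim_equal_rna_to_dna : Prop := ∀ (rna : String), Dom_rna_to_dna rna → Pre_rna_to_dna rna → Spec_rna_to_dna rna (rna_to_dna rna)

-- ===== LEMMAS AND PROOFS =====

-- the character map both programs realise on valid input
def rnaF (c : Char) : Char := if c = 'U' then 'T' else c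

theorem replace_go_UT (l : List Char) : ∀ (fuel : Nat) (acc : List Char),
    l.length ≤ fuel →
    PySem.Chars.replace.go ['U'] ['T'] fuel l acc = acc.reverse ++ l.map rnaF := by
  induction l with
  | nil =>
    intro fuel acc _
    cases fuel <;> simp [PySem.Chars.replace.go]
  | cons c cs ih =>
    intro fuel acc h
    cases fuel with
    | zero => simp at h
    | succ n =>
      simp only [PySem.Chars.replace.go]
      by_cases hU : c = 'U'
      · subst hU
        rw [if_pos (by simp [List.isPrefixOf])]
        simp only [List.length_cons, List.length_nil, List.drop_succ_cons, List.drop_zero,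
          List.reverse_cons, List.reverse_nil, List.nil_append, List.singleton_append]
        rw [ih n ('T' :: acc) (by simpa using h)]
        simp [rnaF]
      · rw [if_neg (by simp [List.isPrefixOf, Ne.symm hU])]
        rw [ih n (c :: acc) (by simpa using h)]
        simp [rnaF, hU]

theorem replace_UT (l : List Char) : PySem.Chars.replace l ['U'] ['T'] = l.map rnaF := by
  rw [PySem.Chars.replace]
  simp only [List.isEmpty_cons, if_false, Bool.false_eq_true]
  simpa using replace_go_UT l l.length [] le_rfl

theorem goA_toList (l : List Char) : ∀ acc : String,
    (∀ c ∈ l, c = 'A' ∨ c = 'C' ∨ c = 'G' ∨ c = 'U') →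
    (rnaGoA acc l).toList = acc.toList ++ l.map rnaF := by
  induction l with
  | nil => intro acc _; simp [rnaGoA]
  | cons c cs ih =>
    intro acc h
    have hc := h c (List.mem_cons_self ..)
    have hcs : ∀ c' ∈ cs, c' = 'A' ∨ c' = 'C' ∨ c' = 'G' ∨ c' = 'U' :=
      fun c' hm => h c' (List.mem_cons_of_mem _ hm)
    rcases hc with h1 | h1 | h1 | h1 <;> subst h1 <;>
      simp [rnaGoA, ih _ hcs, rnaF, String.toList_push]

-- ===== VERDICT (by name: the statement is the Claim_ definition above) =====
theorem rna_to_dna_spec : Claim_equal_rna_to_dna := by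
  intro rna _ hpre'
  have hpre : ∀ c ∈ rna.toList, c = 'A' ∨ c = 'C' ∨ c = 'G' ∨ c = 'U' := by
    intro c hc
    have h4 := List.all_eq_true.mp hpre' c hc
    simp at h4
    tauto
  unfold Spec_rna_to_dna rna_to_dna rna_to_dna_alt
  have hvalid : rna.toList.any (fun c => !(['A', 'C', 'G', 'U'].contains c)) = false := by
    rw [List.any_eq_false]
    intro c hc
    rcases hpre c hc with h | h | h | h <;> simp [h]
  rw [hvalid, if_neg (by simp)]
  apply String.toList_inj.mp
  rw [goA_toList rna.toList "" hpre, PySem.Str.toList_replace]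
  have hU : "U".toList = ['U'] := rfl
  have hT : "T".toList = ['T'] := rfl
  rw [hU, hT, replace_UT]
  rfl
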